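-- pv_equiv track=rewrite | github.com/OuterRef/ProjectEulerProblems | problem36.py | palindromic_bin
-- ===== SOURCE A (Python) =====
-- def gen_bin(length):
--     ans = []
--     for dec in range(pow(2, length)):
--         s_bin = ""
--         remain = dec
--         for power in reversed(range(length)):
--             d = remain // pow(2, power)
--             s_bin += str(d)
--             remain = remain - pow(2, power) * d
--         ans.append(s_bin)
--     return ans
--
-- def bin_2_dec(b_str):
--     b_len = len(b_str)
--     dec = 0
--     for i in range(b_len):
--         dec += int(b_str[-i-1]) * pow(2, i)
--     return dec
--
-- def palindromic_bin(length):
--     if length == 1: return [1]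
--     if length == 2: return [3]
--     ans = []
--     if length % 2:
--         for bin in gen_bin((length - 3) // 2):
--             rev_bin = bin[::-1]
--             ans.append(bin_2_dec('1' + bin + '0' + rev_bin + '1'))
--             ans.append(bin_2_dec('1' + bin + '1' + rev_bin + '1'))
--     else:
--         for bin in gen_bin((length - 2) // 2):
--             rev_bin = bin[::-1]
--             ans.append(bin_2_dec('1' + bin + rev_bin + '1'))
--     return ans
-- ===== SOURCE B (Python) =====
-- def palindromic_bin(length):
--     # Arithmetic construction: no binary strings, no string parsing.
--     if length == 1: return [1]
--     if length == 2: return [3]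
--     ans = []
--     if length % 2:
--         h = (length - 3) // 2
--         for v in range(2 ** h):
--             r, t = 0, v
--             for _ in range(h):
--                 r = r * 2 + t % 2
--                 t //= 2
--             low = 2 ** (length - 1) + v * 2 ** (h + 2) + r * 2 + 1
--             ans.append(low)
--             ans.append(low + 2 ** (h + 1))
--     else:
--         h = (length - 2) // 2
--         for v in range(2 ** h):
--             r, t = 0, v
--             for _ in range(h):
--                 r = r * 2 + t % 2
--                 t //= 2
--             ans.append(2 ** (length - 1) + v * 2 ** (h + 1) + r * 2 + 1)
--     return ans
-- ===== Notes on version B (the rewrite author's own statement) =====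
-- stated objective: alternative
-- what changed: Replaces gen_bin's per-number binary-string construction and bin_2_dec's per-character string parsing with pure integer arithmetic: iterate v over range(2**h), bit-reverse v with a small numeric loop, and assemble each palindrome's decimal value directly from powers of two.
import Mathlib
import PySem

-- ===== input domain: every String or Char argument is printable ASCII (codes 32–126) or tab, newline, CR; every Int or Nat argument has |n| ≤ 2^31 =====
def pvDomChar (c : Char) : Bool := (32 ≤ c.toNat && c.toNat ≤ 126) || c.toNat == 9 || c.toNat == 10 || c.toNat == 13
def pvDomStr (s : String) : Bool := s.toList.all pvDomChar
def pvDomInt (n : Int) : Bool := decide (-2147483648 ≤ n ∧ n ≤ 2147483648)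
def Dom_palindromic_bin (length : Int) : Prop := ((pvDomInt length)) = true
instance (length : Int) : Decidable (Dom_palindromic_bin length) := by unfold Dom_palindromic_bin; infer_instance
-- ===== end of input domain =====

-- B replaces A's binary-string generation/parsing (gen_bin + bin_2_dec) by direct arithmetic:
-- it iterates over the half-value v, bit-reverses v with a small numeric loop, and assembles
-- each palindrome's decimal value from powers of two; objective: alternative (no string building).


-- ===== PORT A =====
-- Python str is modeled as List Char (the PySem.Chars model).
-- pow(2, e): every exponent reached under Pre_ is ≥ 0, so `e.toNat` is exact there
-- (for a negative argument Python raises TypeError; such inputs are outside Pre_).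
def gen_bin (length : Int) : List (List Char) :=
  (PySem.List.pyRange 0 ((2:Int) ^ length.toNat) 1).foldl
    (fun ans dec =>
      let st := ((PySem.List.pyRange 0 length 1).reverse).foldl
        (fun (st : List Char × Int) power =>
          let d := PySem.Int.floordiv st.2 ((2:Int) ^ power.toNat)
          (st.1 ++ PySem.Int.toChars d, st.2 - (2:Int) ^ power.toNat * d))
        ([], dec)
      ans ++ [st.1]) []

-- int(b[i]) on a char: `none`/non-digit cannot occur on the strings A builds; the
-- `.getD 0` defaults are never taken on inputs reached from palindromic_bin.
def bin_2_dec (b : List Char) : Int :=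
  (PySem.List.pyRange 0 (b.length : Int) 1).foldl
    (fun dec i =>
      dec + (match PySem.List.pyGet? b (-i - 1) with
             | some c => (PySem.Int.ofChars? [c]).getD 0
             | none => 0) * (2:Int) ^ i.toNat) 0

def palindromic_bin (length : Int) : List Int :=
  if length = 1 then [1]
  else if length = 2 then [3]
  else if PySem.Int.mod length 2 ≠ 0 then
    (gen_bin (PySem.Int.floordiv (length - 3) 2)).foldl
      (fun ans bin =>
        let rev_bin := (PySem.List.slice? bin none none (-1)).getD []
        (ans ++ [bin_2_dec (['1'] ++ bin ++ ['0'] ++ rev_bin ++ ['1'])])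
          ++ [bin_2_dec (['1'] ++ bin ++ ['1'] ++ rev_bin ++ ['1'])]) []
  else
    (gen_bin (PySem.Int.floordiv (length - 2) 2)).foldl
      (fun ans bin =>
        let rev_bin := (PySem.List.slice? bin none none (-1)).getD []
        ans ++ [bin_2_dec (['1'] ++ bin ++ rev_bin ++ ['1'])]) []

-- ===== PORT B =====
-- 2 ** e: every exponent reached under Pre_ is ≥ 0, so `e.toNat` is exact there.
def palindromic_bin_alt (length : Int) : List Int :=
  if length = 1 then [1]
  else if length = 2 then [3]
  else if PySem.Int.mod length 2 ≠ 0 then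
    let h := PySem.Int.floordiv (length - 3) 2
    (PySem.List.pyRange 0 ((2:Int) ^ h.toNat) 1).foldl
      (fun ans v =>
        let rt := (PySem.List.pyRange 0 h 1).foldl
          (fun (rt : Int × Int) _ =>
            (rt.1 * 2 + PySem.Int.mod rt.2 2, PySem.Int.floordiv rt.2 2)) (0, v)
        let low := (2:Int) ^ (length - 1).toNat + v * (2:Int) ^ (h + 2).toNat + rt.1 * 2 + 1
        (ans ++ [low]) ++ [low + (2:Int) ^ (h + 1).toNat]) []
  else
    let h := PySem.Int.floordiv (length - 2) 2
    (PySem.List.pyRange 0 ((2:Int) ^ h.toNat) 1).foldl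
      (fun ans v =>
        let rt := (PySem.List.pyRange 0 h 1).foldl
          (fun (rt : Int × Int) _ =>
            (rt.1 * 2 + PySem.Int.mod rt.2 2, PySem.Int.floordiv rt.2 2)) (0, v)
        ans ++ [(2:Int) ^ (length - 1).toNat + v * (2:Int) ^ (h + 1).toNat + rt.1 * 2 + 1]) []

-- ===== PRECONDITION & SPEC =====
-- Pre_ excludes exactly the non-positive lengths, where Python A raises TypeError
-- (pow(2, negative) is a float and range() rejects it); B raises TypeError there too.
def Pre_palindromic_bin (length : Int) : Prop := 1 ≤ length
instance (length : Int) : Decidable (Pre_palindromic_bin length) := by unfold Pre_palindromic_bin; infer_instance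
def pvWitness_palindromic_bin : Int := (5)

def Spec_palindromic_bin (length : Int) (out : List Int) : Prop := out = palindromic_bin_alt length
instance (length : Int) (out : List Int) : Decidable (Spec_palindromic_bin length out) := by unfold Spec_palindromic_bin; infer_instance

-- ===== CLAIM (what is proved, stated in full; the proofs are below) =====
def Claim_equal_palindromic_bin : Prop := ∀ (length : Int), Dom_palindromic_bin length → Pre_palindromic_bin length → Spec_palindromic_bin length (palindromic_bin length)

-- ===== LEMMAS AND PROOFS =====

-- int(c) as the ports compute it
def dig (c : Char) : Int := (PySem.Int.ofChars? [c]).getD 0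

def bitc (n : Nat) : Char := if n = 1 then '1' else '0'

-- the h-digit binary string of d (msb first), d < 2^h
def binN : Nat → Nat → List Char
  | 0, _ => []
  | h + 1, d => bitc (d / 2 ^ h) :: binN h (d % 2 ^ h)

-- value of a binary digit string (msb first)
def valM : List Char → Int
  | [] => 0
  | c :: cs => dig c * 2 ^ cs.length + valM cs

theorem length_binN (h d : Nat) : (binN h d).length = h := by
  induction h generalizing d with
  | zero => rfl
  | succ h ih => simp [binN, ih]

theorem dig_bitc (b : Nat) (hb : b < 2) : dig (bitc b) = (b : Int) := by
  interval_cases b <;> decide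

theorem binN_snoc (h e : Nat) (he : e < 2 ^ (h + 1)) :
    binN (h + 1) e = binN h (e / 2) ++ [bitc (e % 2)] := by
  induction h generalizing e with
  | zero =>
    have h2 : e < 2 := by simpa using he
    simp [binN, Nat.mod_eq_of_lt h2]
  | succ h ih =>
    have h1 : e % 2 ^ (h + 1) < 2 ^ (h + 1) := Nat.mod_lt _ (by positivity)
    have e1 : e % 2 ^ (h + 1) % 2 = e % 2 := Nat.mod_mod_of_dvd e (dvd_pow_self 2 (by omega))
    have e2 : e % 2 ^ (h + 1) / 2 = e / 2 % 2 ^ h := by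
      rw [pow_succ']; exact Nat.mod_mul_right_div_self _ 2 (2 ^ h)
    have e3 : e / 2 ^ (h + 1) = e / 2 / 2 ^ h := by
      rw [Nat.div_div_eq_div_mul, ← pow_succ']
    rw [show binN (h + 1 + 1) e = bitc (e / 2 ^ (h + 1)) :: binN (h + 1) (e % 2 ^ (h + 1)) from rfl,
      ih (e % 2 ^ (h + 1)) h1, e1, e2, e3]
    rfl

theorem valM_append (a b : List Char) :
    valM (a ++ b) = valM a * 2 ^ b.length + valM b := by
  induction a with
  | nil => simp [valM]
  | cons c cs ih => simp [valM, ih, List.length_append, pow_add]; ring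

theorem valM_binN (h d : Nat) (hd : d < 2 ^ h) : valM (binN h d) = (d : Int) := by
  induction h generalizing d with
  | zero => simp [binN, valM]; omega
  | succ h ih =>
    have hlt : d / 2 ^ h < 2 := Nat.div_lt_of_lt_mul (by rw [← pow_succ]; exact hd)
    have h2 : d % 2 ^ h < 2 ^ h := Nat.mod_lt _ (by positivity)
    simp only [binN, valM, length_binN, ih _ h2, dig_bitc _ hlt]
    have := Nat.div_add_mod d (2 ^ h)
    push_cast
    nlinarith [this]

theorem nat_lt_two_cases (n : Nat) (h : n < 2) : n = 0 ∨ n = 1 := by omega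

-- ===== characterisation of A's inner fold (binary-string construction) =====
theorem genbin_inner (h : Nat) :
    ∀ (d : Nat) (s0 : List Char), d < 2 ^ h →
    (((PySem.List.pyRange 0 (h : Int) 1).reverse).foldl
        (fun (st : List Char × Int) power =>
          let dd := PySem.Int.floordiv st.2 ((2:Int) ^ power.toNat)
          (st.1 ++ PySem.Int.toChars dd, st.2 - (2:Int) ^ power.toNat * dd))
        (s0, (d : Int))).1 = s0 ++ binN h d := by
  induction h with
  | zero =>
    intro d s0 hd
    have : (PySem.List.pyRange 0 ((0:Nat) : Int) 1) = [] :=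
      PySem.List.pyRange_one_eq_nil (by norm_num)
    simp [binN]
  | succ h ih =>
    intro d s0 hd
    have hsplit : PySem.List.pyRange 0 ((h + 1 : Nat) : Int) 1
        = PySem.List.pyRange 0 (h : Int) 1 ++ [(h : Int)] := by
      have := PySem.List.pyRange_one_succ_right (a := 0) (b := (h : Int)) (by positivity)
      rw [← this]; norm_cast
    rw [hsplit, List.reverse_append]
    simp only [List.reverse_cons, List.reverse_nil, List.nil_append, List.singleton_append,
      List.foldl_cons]
    have htn : ((h : Int)).toNat = h := Int.toNat_natCast h
    have hpow : ((2:Int) ^ h) = ((2 ^ h : Nat) : Int) := by push_cast; ring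
    have hfd : PySem.Int.floordiv (d : Int) ((2:Int) ^ h) = ((d / 2 ^ h : Nat) : Int) := by
      rw [hpow]; exact_mod_cast PySem.Int.floordiv_natCast d (2 ^ h)
    have hlt : d / 2 ^ h < 2 := Nat.div_lt_of_lt_mul (by rw [← pow_succ]; exact hd)
    have hrem : (d : Int) - (2:Int) ^ h * ((d / 2 ^ h : Nat) : Int) = ((d % 2 ^ h : Nat) : Int) := by
      have h2 : (2:Int) ^ h * ((d / 2 ^ h : Nat) : Int) + ((d % 2 ^ h : Nat) : Int) = (d : Int) := by
        exact_mod_cast Nat.div_add_mod d (2 ^ h)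
      linarith
    have hchars : PySem.Int.toChars ((d / 2 ^ h : Nat) : Int) = [bitc (d / 2 ^ h)] := by
      rcases nat_lt_two_cases _ hlt with h0 | h0 <;> rw [h0] <;> decide
    simp only [htn, hfd, hrem, hchars]
    rw [ih (d % 2 ^ h) (s0 ++ [bitc (d / 2 ^ h)]) (Nat.mod_lt _ (by positivity))]
    simp [binN]

-- gen_bin produces the map of binary strings over range(2^h)
theorem gen_bin_eq (h : Nat) :
    gen_bin (h : Int) = (List.range (2 ^ h)).map (fun d => binN h d) := by
  unfold gen_bin
  have htn : ((h : Int)).toNat = h := Int.toNat_natCast h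
  rw [htn]
  have hpow : ((2:Int) ^ h) = ((2 ^ h : Nat) : Int) := by push_cast; ring
  rw [hpow, PySem.List.pyRange_zero_nat (2 ^ h)]
  rw [List.foldl_map, PySem.List.foldl_append_singleton_eq_map (fun (d : Nat) =>
    (((PySem.List.pyRange 0 (h : Int) 1).reverse).foldl
        (fun (st : List Char × Int) power =>
          let dd := PySem.Int.floordiv st.2 ((2:Int) ^ power.toNat)
          (st.1 ++ PySem.Int.toChars dd, st.2 - (2:Int) ^ power.toNat * dd))
        ([], (d : Int))).1)]
  simp only [List.nil_append]
  exact List.map_congr_left (fun d hd => by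
    rw [genbin_inner h d [] (List.mem_range.mp hd)]; simp)

-- ===== characterisation of bin_2_dec =====
theorem bin_2_dec_eq (b : List Char) : bin_2_dec b = valM b := by
  induction b with
  | nil =>
    unfold bin_2_dec
    simp [PySem.List.pyRange_one_eq_nil, valM]
  | cons c cs ih =>
    unfold bin_2_dec at *
    have hlen : ((c :: cs).length : Int) = (cs.length : Int) + 1 := by simp
    rw [hlen, PySem.List.pyRange_one_succ_right (by positivity), List.foldl_append]
    have hstep : ∀ (i : Int), 0 ≤ i → i < (cs.length : Int) →
        (match PySem.List.pyGet? (c :: cs) (-i - 1) with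
         | some ch => (PySem.Int.ofChars? [ch]).getD 0
         | none => 0) =
        (match PySem.List.pyGet? cs (-i - 1) with
         | some ch => (PySem.Int.ofChars? [ch]).getD 0
         | none => 0) := by
      intro i h0 hi
      have hk : (-i - 1) = -((i.toNat + 1 : Nat) : Int) := by push_cast; omega
      have h1 : PySem.List.pyGet? (c :: cs) (-i - 1) = (c :: cs)[(c :: cs).length - (i.toNat + 1)]? := by
        rw [hk]; exact PySem.List.pyGet?_neg_natCast _ _ (by omega) (by simp; omega)
      have h2 : PySem.List.pyGet? cs (-i - 1) = cs[cs.length - (i.toNat + 1)]? := by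
        rw [hk]; exact PySem.List.pyGet?_neg_natCast _ _ (by omega) (by omega)
      have h3 : (c :: cs).length - (i.toNat + 1) = (cs.length - (i.toNat + 1)) + 1 := by
        simp; omega
      rw [h1, h2, h3, List.getElem?_cons_succ]
    have hcongr : (PySem.List.pyRange 0 (cs.length : Int) 1).foldl
        (fun dec i => dec + (match PySem.List.pyGet? (c :: cs) (-i - 1) with
             | some ch => (PySem.Int.ofChars? [ch]).getD 0
             | none => 0) * (2:Int) ^ i.toNat) 0
        = (PySem.List.pyRange 0 (cs.length : Int) 1).foldl
        (fun dec i => dec + (match PySem.List.pyGet? cs (-i - 1) with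
             | some ch => (PySem.Int.ofChars? [ch]).getD 0
             | none => 0) * (2:Int) ^ i.toNat) 0 := by
      refine PySem.List.foldl_congr_mem _ _ _ _ (fun acc x hx => ?_)
      have := (PySem.List.mem_pyRange_one).mp hx
      rw [hstep x this.1 this.2]
    simp only [List.foldl_cons, List.foldl_nil, hcongr, ih]
    have hlast : PySem.List.pyGet? (c :: cs) (-(cs.length : Int) - 1) = some c := by
      have hk : (-(cs.length : Int) - 1) = -(((cs.length + 1 : Nat)) : Int) := by push_cast; ring
      rw [hk, PySem.List.pyGet?_neg_natCast _ _ (by omega) (by simp)]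
      simp
    rw [hlast]
    simp only [valM]
    have : ((cs.length : Int)).toNat = cs.length := Int.toNat_natCast _
    rw [this]
    unfold dig
    ring

-- ===== characterisation of B's bit-reversal loop =====
-- the loop body ignores the loop variable: folding is h-fold iteration
def stepB (p : Int × Int) : Int × Int :=
  (p.1 * 2 + PySem.Int.mod p.2 2, PySem.Int.floordiv p.2 2)

theorem foldl_ignore {α β : Type} (g : β → β) (l : List α) (p : β) :
    l.foldl (fun q _ => g q) p = g^[l.length] p := by
  induction l generalizing p with
  | nil => rfl
  | cons x xs ih => simp [List.foldl_cons, ih, Function.iterate_succ_apply]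

theorem stepB_iterate (h : Nat) :
    ∀ (r : Int) (t : Nat), (stepB^[h] (r, (t : Int))).1
      = r * 2 ^ h + valM ((binN h (t % 2 ^ h)).reverse) := by
  induction h with
  | zero => intro r t; simp [binN, valM]
  | succ h ih =>
    intro r t
    rw [Function.iterate_succ_apply]
    have hm : PySem.Int.mod (t : Int) 2 = ((t % 2 : Nat) : Int) := by
      exact_mod_cast PySem.Int.mod_natCast t 2
    have hf : PySem.Int.floordiv (t : Int) 2 = ((t / 2 : Nat) : Int) := by
      exact_mod_cast PySem.Int.floordiv_natCast t 2
    have hs : stepB (r, (t : Int)) = (r * 2 + ((t % 2 : Nat) : Int), ((t / 2 : Nat) : Int)) := by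
      unfold stepB; rw [hm, hf]
    rw [hs, ih]
    have he : t % 2 ^ (h + 1) < 2 ^ (h + 1) := Nat.mod_lt _ (by positivity)
    rw [binN_snoc h (t % 2 ^ (h + 1)) he]
    have e1 : t % 2 ^ (h + 1) % 2 = t % 2 := Nat.mod_mod_of_dvd t (dvd_pow_self 2 (by omega))
    have e2 : t % 2 ^ (h + 1) / 2 = t / 2 % 2 ^ h := by
      rw [pow_succ']; exact Nat.mod_mul_right_div_self _ 2 (2 ^ h)
    rw [List.reverse_append]
    simp only [List.reverse_cons, List.reverse_nil, List.nil_append, List.singleton_append, valM,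
      List.length_reverse, length_binN, e1, e2]
    rw [dig_bitc _ (Nat.mod_lt _ (by omega))]
    push_cast
    ring

-- helper: the B loop value for v < 2^h
theorem b_loop_val (h v : Nat) (hv : v < 2 ^ h) :
    ((PySem.List.pyRange 0 (h : Int) 1).foldl
      (fun (rt : Int × Int) _ =>
        (rt.1 * 2 + PySem.Int.mod rt.2 2, PySem.Int.floordiv rt.2 2)) (0, (v : Int))).1
    = valM ((binN h v).reverse) := by
  have : (PySem.List.pyRange 0 (h : Int) 1).foldl
      (fun (rt : Int × Int) _ =>
        (rt.1 * 2 + PySem.Int.mod rt.2 2, PySem.Int.floordiv rt.2 2)) (0, (v : Int))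
      = stepB^[(PySem.List.pyRange 0 (h : Int) 1).length] (0, (v : Int)) :=
    foldl_ignore stepB _ _
  rw [this]
  have hlen : (PySem.List.pyRange 0 (h : Int) 1).length = h := by
    rw [PySem.List.length_pyRange_one]; simp
  rw [hlen, stepB_iterate h 0 v, Nat.mod_eq_of_lt hv]
  ring

-- value of an assembled odd palindrome string
theorem valM_palin_odd (h d : Nat) (m : Char) (hd : d < 2 ^ h) :
    valM (['1'] ++ binN h d ++ [m] ++ (binN h d).reverse ++ ['1'])
      = 2 ^ (2 * h + 2) + (d : Int) * 2 ^ (h + 2) + dig m * 2 ^ (h + 1)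
        + valM ((binN h d).reverse) * 2 + 1 := by
  simp only [valM_append, valM, length_binN, List.length_reverse,
    List.length_cons, List.length_nil, valM_binN h d hd]
  have d1 : dig '1' = 1 := by decide
  simp only [d1]
  ring_nf

-- value of an assembled even palindrome string
theorem valM_palin_even (h d : Nat) (hd : d < 2 ^ h) :
    valM (['1'] ++ binN h d ++ (binN h d).reverse ++ ['1'])
      = 2 ^ (2 * h + 1) + (d : Int) * 2 ^ (h + 1) + valM ((binN h d).reverse) * 2 + 1 := by
  simp only [valM_append, valM, length_binN, List.length_reverse,
    List.length_cons, List.length_nil, valM_binN h d hd]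
  have d1 : dig '1' = 1 := by decide
  simp only [d1]
  ring_nf

theorem main_eq (length : Int) (h3 : 3 ≤ length) :
    palindromic_bin length = palindromic_bin_alt length := by
  unfold palindromic_bin palindromic_bin_alt
  have hn1 : ¬(length = 1) := by omega
  have hn2 : ¬(length = 2) := by omega
  rw [if_neg hn1, if_neg hn2, if_neg hn1, if_neg hn2]
  by_cases hpar : PySem.Int.mod length 2 ≠ 0
  · -- odd
    rw [if_pos hpar, if_pos hpar]
    simp only []
    have hmod : length % 2 = 1 := by
      rw [PySem.Int.mod_eq_emod_of_pos (by omega)] at hpar; omega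
    obtain ⟨h, hL⟩ : ∃ h : Nat, length = 2 * (h : Int) + 3 := by
      refine ⟨(length - 3).toNat / 2, ?_⟩; omega
    have hfd : PySem.Int.floordiv (length - 3) 2 = (h : Int) := by
      rw [PySem.Int.floordiv_eq_ediv_of_pos (by omega)]; omega
    rw [hfd, gen_bin_eq h]
    have htn : ((h : Int)).toNat = h := Int.toNat_natCast h
    have hpow : ((2:Int) ^ h) = ((2 ^ h : Nat) : Int) := by push_cast; ring
    rw [htn, hpow, PySem.List.pyRange_zero_nat (2 ^ h), List.foldl_map, List.foldl_map]
    refine PySem.List.foldl_congr_mem _ _ _ _ (fun acc d hd => ?_)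
    have hdlt : d < 2 ^ h := List.mem_range.mp hd
    simp only [PySem.List.slice?_none_none_neg_one, Option.getD_some, List.append_assoc]
    rw [bin_2_dec_eq, bin_2_dec_eq, b_loop_val h d hdlt]
    have e1 := valM_palin_odd h d '0' hdlt
    have e2 := valM_palin_odd h d '1' hdlt
    simp only [List.append_assoc] at e1 e2
    rw [e1, e2]
    have d0 : dig '0' = 0 := by decide
    have d1 : dig '1' = 1 := by decide
    have p1 : (length - 1).toNat = 2 * h + 2 := by omega
    have p2 : ((h : Int) + 2).toNat = h + 2 := by omega
    have p3 : ((h : Int) + 1).toNat = h + 1 := by omega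
    rw [d0, d1, p1, p2, p3]
    ring_nf
  · -- even
    rw [if_neg hpar, if_neg hpar]
    simp only []
    have hmod : length % 2 = 0 := by
      rw [PySem.Int.mod_eq_emod_of_pos (by omega), not_not] at hpar; omega
    obtain ⟨h, hL⟩ : ∃ h : Nat, length = 2 * (h : Int) + 2 := by
      refine ⟨(length - 2).toNat / 2, ?_⟩; omega
    have hfd : PySem.Int.floordiv (length - 2) 2 = (h : Int) := by
      rw [PySem.Int.floordiv_eq_ediv_of_pos (by omega)]; omega
    rw [hfd, gen_bin_eq h]
    have htn : ((h : Int)).toNat = h := Int.toNat_natCast h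
    have hpow : ((2:Int) ^ h) = ((2 ^ h : Nat) : Int) := by push_cast; ring
    rw [htn, hpow, PySem.List.pyRange_zero_nat (2 ^ h), List.foldl_map, List.foldl_map]
    refine PySem.List.foldl_congr_mem _ _ _ _ (fun acc d hd => ?_)
    have hdlt : d < 2 ^ h := List.mem_range.mp hd
    simp only [PySem.List.slice?_none_none_neg_one, Option.getD_some, List.append_assoc]
    rw [bin_2_dec_eq, b_loop_val h d hdlt]
    have e1 := valM_palin_even h d hdlt
    simp only [List.append_assoc] at e1
    rw [e1]
    have p1 : (length - 1).toNat = 2 * h + 1 := by omega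
    have p3 : ((h : Int) + 1).toNat = h + 1 := by omega
    rw [p1, p3]

-- ===== VERDICT (by name: the statement is the Claim_ definition above) =====
theorem palindromic_bin_spec : Claim_equal_palindromic_bin := by
  intro length _ hpre
  unfold Spec_palindromic_bin
  by_cases h1 : length = 1
  · subst h1; rfl
  · by_cases h2 : length = 2
    · subst h2; rfl
    · exact main_eq length (by unfold Pre_palindromic_bin at hpre; omega)
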